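-- pv_equiv track=rewrite | github.com/cksdud150/HTG | 토스/4.py | solution
-- ===== SOURCE A (Python) =====
-- from collections import defaultdict
--
-- def solution(maxSize, actions):
--     now = ''
--     back = []
--     forward = []
--     history = []
--     for a in actions:
--         if a == 'B':
--             if not back:
--                 continue
--             else:
--                 forward.append(now)
--                 now = back.pop()
--                 history.append(now)
--
--         elif a == 'F':
--             if not forward:
--                 continue
--             else:
--                 back.append(now)
--                 now = forward.pop()
--                 history.append(now)
--
--         else:
--             if now:
--                 back.append(now)
--             now = a
--             history.append(now)
--             forward = []
--
--     answer = []
--     dic = defaultdict(int)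
--     while len(answer) < maxSize:
--         if not history:
--             return answer
--         temp = history.pop()
--         if dic[temp]:
--             continue
--         else:
--             answer.append(temp)
--             dic[temp] = 1
--     return answer
-- ===== SOURCE B (Python) =====
-- def solution(maxSize, actions):
--     # single timeline list + cursor instead of two stacks
--     seq = ['']
--     i = 0
--     history = []
--     for a in actions:
--         if a == 'B':
--             if i > 0:
--                 i -= 1
--                 history.append(seq[i])
--         elif a == 'F':
--             if i < len(seq) - 1:
--                 i += 1
--                 history.append(seq[i])
--         else:
--             if seq[i]:
--                 del seq[i + 1:]
--                 i += 1
--             else: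
--                 del seq[i:]
--             seq.append(a)
--             history.append(a)
--     answer = []
--     seen = set()
--     for p in reversed(history):
--         if len(answer) >= maxSize:
--             break
--         if p not in seen:
--             seen.add(p)
--             answer.append(p)
--     return answer
-- ===== Notes on version B (the rewrite author's own statement) =====
-- stated objective: alternative
-- what changed: Replaces the two-stack (back/forward) navigation with a single timeline list plus an integer cursor (truncate on navigate), and replaces the destructive pop-and-defaultdict dedup loop with a single forward scan over the reversed history using a set.
import Mathlib
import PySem

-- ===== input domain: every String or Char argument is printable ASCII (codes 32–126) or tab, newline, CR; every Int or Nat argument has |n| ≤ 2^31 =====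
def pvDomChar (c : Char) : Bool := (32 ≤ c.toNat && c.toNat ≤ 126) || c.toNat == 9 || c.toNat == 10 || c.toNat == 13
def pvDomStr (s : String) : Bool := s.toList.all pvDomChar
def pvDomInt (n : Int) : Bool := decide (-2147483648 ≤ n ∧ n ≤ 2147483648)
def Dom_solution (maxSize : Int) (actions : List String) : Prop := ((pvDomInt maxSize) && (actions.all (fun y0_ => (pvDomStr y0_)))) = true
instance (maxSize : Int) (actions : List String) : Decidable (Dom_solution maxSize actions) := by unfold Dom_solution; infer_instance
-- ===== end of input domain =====

-- B replaces A's two navigation stacks by one timeline list with a cursor, and A's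
-- destructive pop-and-defaultdict dedup loop by one scan of the reversed history with a set
-- (alternative decomposition, same cost).

-- ===== PORT A =====
-- Stacks are Lean lists with the TOP at the head (Python's append/pop at the right end);
-- history is likewise accumulated head-newest (Python appends at the right, then pops from
-- the right in the dedup loop, i.e. consumes newest first = our head).
def solutionNav : String → List String → List String → List String → List String →
    String × List String × List String × List String
  | now, back, forward, history, [] => (now, back, forward, history)
  | now, back, forward, history, a :: rest =>
    if a == "B" then
      match back with
      | [] => solutionNav now back forward history rest
      | b :: back' => solutionNav b back' (now :: forward) (b :: history) rest
    else if a == "F" then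
      match forward with
      | [] => solutionNav now back forward history rest
      | f :: forward' => solutionNav f (now :: back) forward' (f :: history) rest
    else
      if now ≠ "" then solutionNav a (now :: back) [] (a :: history) rest
      else solutionNav a back [] (a :: history) rest

-- A's `dic[temp]` on the defaultdict also inserts a 0 entry for a missing key; that entry is
-- never observable through `getD _ _ 0`, so the port only reads with default 0.
def solutionDedup (maxSize : Int) : List String → PySem.Dict String Int → List String → List String
  | history, dic, answer =>
    if (answer.length : Int) < maxSize then
      match history with
      | [] => answer
      | temp :: hist' =>
        if PySem.Dict.getD dic temp 0 ≠ 0 then solutionDedup maxSize hist' dic answer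
        else solutionDedup maxSize hist' (PySem.Dict.insert dic temp 1) (answer ++ [temp])
    else answer

def solution (maxSize : Int) (actions : List String) : List String :=
  solutionDedup maxSize (solutionNav "" [] [] [] actions).2.2.2 PySem.Dict.empty []

-- ===== PORT B =====
-- seq is Source B's timeline list, i the cursor; seq[i] is always in range (invariant i < seq.length),
-- ported as getD with "" which is exact there. history accumulated head-newest, so Source B's
-- `for p in reversed(history)` is a scan of this list from the head.
def altNav : List String → Nat → List String → List String →
    List String × Nat × List String
  | seq, i, history, [] => (seq, i, history)
  | seq, i, history, a :: rest =>
    if a == "B" then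
      if 0 < i then altNav seq (i - 1) (seq.getD (i - 1) "" :: history) rest
      else altNav seq i history rest
    else if a == "F" then
      if i + 1 < seq.length then altNav seq (i + 1) (seq.getD (i + 1) "" :: history) rest
      else altNav seq i history rest
    else
      if seq.getD i "" ≠ "" then altNav (seq.take (i + 1) ++ [a]) (i + 1) (a :: history) rest
      else altNav (seq.take i ++ [a]) i (a :: history) rest

def altDedup (maxSize : Int) : List String → PySem.Set String → List String → List String
  | [], _, answer => answer
  | p :: rest, seen, answer =>
    if maxSize ≤ (answer.length : Int) then answer
    else if seen.contains p then altDedup maxSize rest seen answer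
    else altDedup maxSize rest (PySem.Set.add seen p) (answer ++ [p])

def solution_alt (maxSize : Int) (actions : List String) : List String :=
  altDedup maxSize (altNav [""] 0 [] actions).2.2 PySem.Set.empty []

-- ===== PRECONDITION & SPEC =====
def Spec_solution (maxSize : Int) (actions : List String) (out : List String) : Prop := out = solution_alt maxSize actions
instance (maxSize : Int) (actions : List String) (out : List String) : Decidable (Spec_solution maxSize actions out) := by unfold Spec_solution; infer_instance

-- ===== CLAIM (what is proved, stated in full; the proofs are below) =====
def Claim_equal_solution : Prop := ∀ (maxSize : Int) (actions : List String), Dom_solution maxSize actions → Spec_solution maxSize actions (solution maxSize actions)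

-- ===== LEMMAS AND PROOFS =====

-- Navigation invariant: seq = reverse back ++ now :: forward, cursor = back.length.
lemma nav_equiv (actions : List String) : ∀ (now : String) (back forward history : List String),
    (altNav (back.reverse ++ now :: forward) back.length history actions).2.2
      = (solutionNav now back forward history actions).2.2.2 := by
  induction actions with
  | nil => intro now back forward history; rfl
  | cons a rest ih =>
    intro now back forward history
    simp only [altNav, solutionNav]
    by_cases hB : a == "B"
    · simp only [hB, if_true]
      cases back with
      | nil => simpa using ih now [] forward history
      | cons b back' =>
        have hlt : 0 < (b :: back').length := Nat.succ_pos _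
        have hget : (((b :: back').reverse ++ now :: forward).getD ((b :: back').length - 1) "") = b := by
          have h1 : (b :: back').reverse ++ now :: forward
              = back'.reverse ++ (b :: now :: forward) := by simp
          rw [h1, List.getD_append_right _ _ _ _ (by simp)]
          simp
        have hseq : (b :: back').reverse ++ now :: forward
            = back'.reverse ++ b :: now :: forward := by simp
        rw [if_pos hlt, hget, hseq]
        have : (b :: back').length - 1 = back'.length := by simp
        rw [this]
        exact ih b back' (now :: forward) (b :: history)
    · simp only [hB]
      by_cases hF : a == "F"
      · simp only [hF, if_true]
        cases forward with
        | nil =>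
          have : ¬ back.length + 1 < (back.reverse ++ [now]).length := by simp
          rw [if_neg this]
          simpa using ih now back [] history
        | cons f forward' =>
          have hlen : back.length + 1 < (back.reverse ++ now :: f :: forward').length := by
            simp
          have hget : ((back.reverse ++ now :: f :: forward').getD (back.length + 1) "") = f := by
            rw [List.getD_append_right _ _ _ _ (by simp)]
            simp
          have hseq : back.reverse ++ now :: f :: forward'
              = (now :: back).reverse ++ f :: forward' := by simp
          rw [if_pos hlen, hget, hseq]
          have : back.length + 1 = (now :: back).length := rfl
          rw [this]
          exact ih f (now :: back) forward' (f :: history)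
      · simp only [hF]
        have hgetnow : ((back.reverse ++ now :: forward).getD back.length "") = now := by
          rw [List.getD_append_right _ _ _ _ (by simp)]
          simp
        rw [hgetnow]
        by_cases hnow : now ≠ ""
        · rw [if_pos hnow, if_pos hnow]
          have htake : (back.reverse ++ now :: forward).take (back.length + 1) ++ [a]
              = (now :: back).reverse ++ a :: [] := by
            rw [List.take_append]
            simp
          rw [htake]
          have : back.length + 1 = (now :: back).length := rfl
          rw [this]
          exact ih a (now :: back) [] (a :: history)
        · rw [if_neg hnow, if_neg hnow]
          have htake : (back.reverse ++ now :: forward).take back.length ++ [a]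
              = back.reverse ++ a :: [] := by
            rw [List.take_append]
            simp
          rw [htake]
          exact ih a back [] (a :: history)

-- Dedup invariant: the set of already-seen pages matches the dict's nonzero keys.
lemma dedup_equiv (maxSize : Int) : ∀ (history : List String) (dic : PySem.Dict String Int)
    (seen : PySem.Set String) (answer : List String),
    (∀ s : String, seen.contains s = true ↔ PySem.Dict.getD dic s 0 ≠ 0) →
    altDedup maxSize history seen answer = solutionDedup maxSize history dic answer := by
  intro history
  induction history with
  | nil =>
    intro dic seen answer _
    simp only [altDedup, solutionDedup]
    split <;> rfl
  | cons p rest ih =>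
    intro dic seen answer hinv
    simp only [altDedup, solutionDedup]
    by_cases hlen : (answer.length : Int) < maxSize
    · rw [if_pos hlen, if_neg (not_le.mpr hlen)]
      by_cases hseen : seen.contains p = true
      · rw [if_pos hseen, if_pos ((hinv p).mp hseen)]
        exact ih dic seen answer hinv
      · rw [if_neg hseen, if_neg (fun h => hseen ((hinv p).mpr h))]
        refine ih _ _ _ ?_
        intro s
        by_cases hsp : s = p
        · subst hsp
          constructor
          · intro _
            simp
          · intro _
            have hmem : s ∉ seen := by simpa [PySem.Set.contains] using hseen
            simp [PySem.Set.add, PySem.Set.contains, hmem]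
        · have h1 : (PySem.Set.add seen p).contains s = seen.contains s := by
            simp only [PySem.Set.add]
            split
            · rfl
            · simp [PySem.Set.contains, hsp]
          have h2 : PySem.Dict.getD (PySem.Dict.insert dic p 1) s 0 = PySem.Dict.getD dic s 0 := by
            rw [PySem.Dict.getD_insert]
            simp [hsp]
          rw [h1, h2]
          exact hinv s
    · rw [if_neg hlen, if_pos (not_lt.mp hlen)]

-- ===== VERDICT (by name: the statement is the Claim_ definition above) =====
theorem solution_spec : Claim_equal_solution := by
  intro maxSize actions _
  unfold Spec_solution solution solution_alt
  have hnav := nav_equiv actions "" [] [] []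
  simp only [List.reverse_nil, List.nil_append, List.length_nil] at hnav
  rw [← hnav]
  exact (dedup_equiv maxSize _ PySem.Dict.empty PySem.Set.empty [] (by
    intro s
    simp [PySem.Set.empty, PySem.Set.contains, PySem.Dict.getD, PySem.Dict.get?, PySem.Dict.empty])).symm
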